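-- pv_equiv track=rewrite | github.com/c3nav/c3nav | src/c3nav/mapdata/process/locationrelation.py | calc_depth_first_pre_order
-- ===== SOURCE A (Python) =====
-- from collections import deque, defaultdict
--
-- def calc_depth_first_pre_order(root_tag_ids: list[int],
--                                children_for_parent: dict[int, list[int]]) -> dict[int | None, dict[int, int]]:
--     result: dict[int | None, dict[int, int]] = defaultdict(dict)  # dict to maintain insertion order
--
--     def add(ancestors: set, descendant_id: int):
--         new_ancestors = ancestors | {descendant_id}
--         for ancestor_id in ancestors:
--             result[ancestor_id].setdefault(descendant_id, len(result[ancestor_id]))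
--         for child_id in children_for_parent[descendant_id]:
--             add(new_ancestors, child_id)
--
--     start_ancestors = {None}
--     for root_id in root_tag_ids:
--         add(start_ancestors, root_id)
--
--     return result
-- ===== SOURCE B (Python) =====
-- from collections import defaultdict
--
--
-- def calc_depth_first_pre_order(root_tag_ids, children_for_parent):
--     # Iterative DFS with an explicit stack instead of the recursive helper.
--     result = defaultdict(dict)
--     stack = [(root_id, {None}) for root_id in reversed(root_tag_ids)]
--     while stack:
--         node_id, ancestors = stack.pop()
--         for ancestor_id in ancestors:
--             result[ancestor_id].setdefault(node_id, len(result[ancestor_id]))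
--         new_ancestors = ancestors | {node_id}
--         for child_id in reversed(children_for_parent[node_id]):
--             stack.append((child_id, new_ancestors))
--     return result
-- ===== Notes on version B (the rewrite author's own statement) =====
-- stated objective: alternative
-- what changed: Replaces A's recursive add() helper with an explicit-stack iterative DFS that pushes (child, ancestors) entries in reverse order so the pop order reproduces A's pre-order exactly.
import Mathlib
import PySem

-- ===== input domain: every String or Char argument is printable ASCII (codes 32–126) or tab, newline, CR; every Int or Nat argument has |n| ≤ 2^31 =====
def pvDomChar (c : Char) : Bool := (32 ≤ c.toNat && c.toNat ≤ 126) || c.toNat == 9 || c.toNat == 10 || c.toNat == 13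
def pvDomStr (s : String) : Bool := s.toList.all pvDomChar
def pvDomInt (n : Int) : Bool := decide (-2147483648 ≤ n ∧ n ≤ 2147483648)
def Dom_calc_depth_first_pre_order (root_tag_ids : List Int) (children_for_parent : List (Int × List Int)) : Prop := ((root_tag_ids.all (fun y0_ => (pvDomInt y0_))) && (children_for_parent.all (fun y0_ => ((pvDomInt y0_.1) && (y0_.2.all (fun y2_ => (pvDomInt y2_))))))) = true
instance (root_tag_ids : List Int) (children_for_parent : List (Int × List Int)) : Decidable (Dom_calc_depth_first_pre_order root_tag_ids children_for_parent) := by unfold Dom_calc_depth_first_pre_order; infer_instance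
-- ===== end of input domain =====

-- B replaces A's recursive add() helper by an explicit-stack iterative DFS (same output; objective:
-- alternative decomposition, no speed claim).  Both ports return the result dict as an
-- (outer items, inner items) list; Python iterates the `ancestors` SET, which only affects the outer
-- dict's insertion order — dict outputs are compared ignoring order, and each inner index map is
-- order-independent, so the ports iterate the PySem.Set (first-insertion order) instead.

-- ===== PORT A =====
-- result[ancestor_id].setdefault(descendant_id, len(result[ancestor_id])) on a defaultdict(dict)
def pvStep (res : PySem.Dict (Option Int) (PySem.Dict Int Int)) (a : Option Int) (n : Int) :
    PySem.Dict (Option Int) (PySem.Dict Int Int) :=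
  let d := res.getD a PySem.Dict.empty        -- defaultdict access result[ancestor_id]
  res.insert a (PySem.Dict.setdefault d n (d.size : Int))

-- fuel: totality plumbing only (the Python recursion has none; it diverges on reachable cycles, which
-- Pre_ excludes).  One unit is consumed per node visit; the bound is astronomically generous.
def pvFuel (root_tag_ids : List Int) (children_for_parent : List (Int × List Int)) : Nat :=
  let L := root_tag_ids.length + children_for_parent.foldl (fun s p => s + 1 + p.2.length) 0
  (L + 2) ^ (L + 2)

mutual
-- the recursive helper `add(ancestors, descendant_id)`; threads the remaining fuel through
def pvAdd (cfp : List (Int × List Int)) (res : PySem.Dict (Option Int) (PySem.Dict Int Int))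
    (ancestors : PySem.Set (Option Int)) (n : Int) (fuel : Nat) :
    PySem.Dict (Option Int) (PySem.Dict Int Int) × Nat :=
  match fuel with
  | 0 => (res, 0)
  | f + 1 =>
    let newAncestors := PySem.Set.add ancestors (some n)
    let res1 := ancestors.foldl (fun r a => pvStep r a n) res
    -- children_for_parent[descendant_id]: KeyError (= none) excluded by Pre_
    pvChildLoop cfp res1 newAncestors ((PySem.Dict.get? (PySem.Dict.mk cfp) n).getD []) f
termination_by (fuel, 0)
decreasing_by exact Prod.Lex.left _ _ (Nat.lt_succ_self _)
-- `for child_id in children: add(new_ancestors, child_id)` (also A's main `for root_id in root_tag_ids`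
-- loop); `min` only caps the threaded fuel for termination — it never bites (pvAdd_snd_le below)
def pvChildLoop (cfp : List (Int × List Int)) (res : PySem.Dict (Option Int) (PySem.Dict Int Int))
    (ancestors : PySem.Set (Option Int)) (cs : List Int) (fuel : Nat) :
    PySem.Dict (Option Int) (PySem.Dict Int Int) × Nat :=
  match cs with
  | [] => (res, fuel)
  | c :: cs' =>
    let r := pvAdd cfp res ancestors c fuel
    pvChildLoop cfp r.1 ancestors cs' (min r.2 fuel)
termination_by (fuel, cs.length + 1)
decreasing_by
  · exact Prod.Lex.right _ (by simp)
  · rcases Nat.lt_or_ge (min r.2 fuel) fuel with h | h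
    · exact Prod.Lex.left _ _ h
    · have he : min r.2 fuel = fuel := le_antisymm (Nat.min_le_right _ _) h
      rw [he]; exact Prod.Lex.right _ (by simp)
end

def calc_depth_first_pre_order (root_tag_ids : List Int) (children_for_parent : List (Int × List Int)) : List (Option Int × List (Int × Int)) :=
  (pvChildLoop children_for_parent PySem.Dict.empty (PySem.Set.ofList [none]) root_tag_ids
    (pvFuel root_tag_ids children_for_parent)).1.items.map (fun p => (p.1, p.2.items))

-- ===== PORT B =====
-- the `while stack:` loop; the stack is a head-is-top list (Python appends the children REVERSED and
-- pops from the end, which is the same pop order); fuel = one unit per pop, totality plumbing only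
def pvLoop (cfp : List (Int × List Int)) (res : PySem.Dict (Option Int) (PySem.Dict Int Int))
    (stack : List (Int × PySem.Set (Option Int))) (fuel : Nat) :
    PySem.Dict (Option Int) (PySem.Dict Int Int) :=
  match fuel, stack with
  | _, [] => res
  | 0, _ :: _ => res
  | f + 1, (n, ancestors) :: rest =>
    let res1 := ancestors.foldl (fun r a => pvStep r a n) res
    let newAncestors := PySem.Set.add ancestors (some n)
    pvLoop cfp res1
      ((((PySem.Dict.get? (PySem.Dict.mk cfp) n).getD []).map (fun c => (c, newAncestors))) ++ rest) f

def calc_depth_first_pre_order_alt (root_tag_ids : List Int) (children_for_parent : List (Int × List Int)) : List (Option Int × List (Int × Int)) :=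
  (pvLoop children_for_parent PySem.Dict.empty
    (root_tag_ids.map (fun rt => (rt, PySem.Set.ofList [none])))
    (pvFuel root_tag_ids children_for_parent)).items.map (fun p => (p.1, p.2.items))

-- ===== PRECONDITION & SPEC =====
-- Closure of the ids reachable from the roots along the children relation (children of ids that are
-- not keys count as none); enough update rounds are taken for the closure to be reached.
def pvReachAux (cfp : List (Int × List Int)) : Nat → PySem.Set Int → PySem.Set Int
  | 0, s => s
  | k + 1, s =>
    pvReachAux cfp k
      (PySem.Set.update s (s.flatMap (fun n => (PySem.Dict.get? (PySem.Dict.mk cfp) n).getD [])))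

def pvReach (root_tag_ids : List Int) (cfp : List (Int × List Int)) : PySem.Set Int :=
  pvReachAux cfp (root_tag_ids.length + cfp.foldl (fun s p => s + 1 + p.2.length) 0 + 1)
    (PySem.List.dedup root_tag_ids)

-- Kahn-style acyclicity of the children relation on a node set: repeatedly discard a node none of whose
-- children is still present; acyclic iff everything can be discarded.  (A declarative check on the input
-- graph, not a re-run of either port's traversal.)
def pvAcyclicAux (cfp : List (Int × List Int)) : Nat → List Int → Bool
  | 0, remaining => remaining.isEmpty
  | steps + 1, remaining =>
    match remaining.find?
        (fun k => ((PySem.Dict.get? (PySem.Dict.mk cfp) k).getD []).all (fun c => !(remaining.contains c))) with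
    | some k => pvAcyclicAux cfp steps (remaining.erase k)
    | none => remaining.isEmpty

-- at most `remaining.length` discard rounds are ever possible, so the counter never cuts the check short
def pvAcyclic (cfp : List (Int × List Int)) (remaining : List Int) : Bool :=
  pvAcyclicAux cfp remaining.length remaining

-- Pre_ excludes exactly the inputs on which A raises: a KeyError when an id reachable from the roots
-- (a root or a transitive child) is missing from children_for_parent, and a RecursionError when a cycle
-- is reachable from the roots.
def Pre_calc_depth_first_pre_order (root_tag_ids : List Int) (children_for_parent : List (Int × List Int)) : Prop :=
  ((pvReach root_tag_ids children_for_parent).all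
      (fun n => (children_for_parent.map Prod.fst).contains n)
    && pvAcyclic children_for_parent (pvReach root_tag_ids children_for_parent)) = true
instance (root_tag_ids : List Int) (children_for_parent : List (Int × List Int)) : Decidable (Pre_calc_depth_first_pre_order root_tag_ids children_for_parent) := by unfold Pre_calc_depth_first_pre_order; infer_instance

def pvWitness_calc_depth_first_pre_order : List Int × (List (Int × List Int)) :=
  ([1], [(1, [2, 3]), (2, [3]), (3, [])])

def Spec_calc_depth_first_pre_order (root_tag_ids : List Int) (children_for_parent : List (Int × List Int)) (out : List (Option Int × List (Int × Int))) : Prop := out = calc_depth_first_pre_order_alt root_tag_ids children_for_parent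
instance (root_tag_ids : List Int) (children_for_parent : List (Int × List Int)) (out : List (Option Int × List (Int × Int))) : Decidable (Spec_calc_depth_first_pre_order root_tag_ids children_for_parent out) := by unfold Spec_calc_depth_first_pre_order; infer_instance

-- ===== CLAIM (what is proved, stated in full; the proofs are below) =====
def Claim_equal_calc_depth_first_pre_order : Prop := ∀ (root_tag_ids : List Int) (children_for_parent : List (Int × List Int)), Dom_calc_depth_first_pre_order root_tag_ids children_for_parent → Pre_calc_depth_first_pre_order root_tag_ids children_for_parent → Spec_calc_depth_first_pre_order root_tag_ids children_for_parent (calc_depth_first_pre_order root_tag_ids children_for_parent)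

-- ===== LEMMAS AND PROOFS =====

-- proof-side view of A's pending recursive calls as a work list (threads the fuel exactly as A does)
def pvRun (cfp : List (Int × List Int)) (res : PySem.Dict (Option Int) (PySem.Dict Int Int)) :
    List (Int × PySem.Set (Option Int)) → Nat → PySem.Dict (Option Int) (PySem.Dict Int Int) × Nat
  | [], f => (res, f)
  | (n, anc) :: rest, f =>
    let r := pvAdd cfp res anc n f
    pvRun cfp r.1 rest r.2

theorem pvChildLoop_snd_le (cfp : List (Int × List Int)) (cs : List Int) :
    ∀ res anc f, (pvChildLoop cfp res anc cs f).2 ≤ f := by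
  induction cs with
  | nil => intro res anc f; simp [pvChildLoop]
  | cons c cs ih =>
    intro res anc f
    rw [pvChildLoop]
    exact le_trans (ih _ _ _) (Nat.min_le_right _ _)

theorem pvAdd_snd_le (cfp : List (Int × List Int)) (res : PySem.Dict (Option Int) (PySem.Dict Int Int))
    (anc : PySem.Set (Option Int)) (n : Int) (f : Nat) : (pvAdd cfp res anc n f).2 ≤ f := by
  cases f with
  | zero => rw [pvAdd]
  | succ f => rw [pvAdd]; exact le_trans (pvChildLoop_snd_le _ _ _ _ _) (Nat.le_succ _)

theorem pvChildLoop_eq_pvRun (cfp : List (Int × List Int)) (cs : List Int) :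
    ∀ res anc f, pvChildLoop cfp res anc cs f = pvRun cfp res (cs.map (fun c => (c, anc))) f := by
  induction cs with
  | nil => intro res anc f; rw [pvChildLoop]; simp [pvRun]
  | cons c cs ih =>
    intro res anc f
    rw [pvChildLoop]
    have hmin : min (pvAdd cfp res anc c f).2 f = (pvAdd cfp res anc c f).2 :=
      Nat.min_eq_left (pvAdd_snd_le _ _ _ _ _)
    simp only [hmin, List.map_cons, pvRun]
    exact ih _ _ _

theorem pvRun_append (cfp : List (Int × List Int)) (s1 : List (Int × PySem.Set (Option Int))) :
    ∀ s2 res f, pvRun cfp res (s1 ++ s2) f =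
      pvRun cfp (pvRun cfp res s1 f).1 s2 (pvRun cfp res s1 f).2 := by
  induction s1 with
  | nil => intro s2 res f; simp [pvRun]
  | cons p s1 ih =>
    intro s2 res f
    obtain ⟨n, anc⟩ := p
    simp only [List.cons_append, pvRun]
    exact ih _ _ _

theorem pvRun_zero (cfp : List (Int × List Int)) (stack : List (Int × PySem.Set (Option Int))) :
    ∀ res, pvRun cfp res stack 0 = (res, 0) := by
  induction stack with
  | nil => intro res; simp [pvRun]
  | cons p stack ih =>
    intro res
    obtain ⟨n, anc⟩ := p
    rw [pvRun]
    simp only [pvAdd]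
    exact ih _

theorem pvLoop_eq_pvRun (cfp : List (Int × List Int)) (f : Nat) :
    ∀ stack res, pvLoop cfp res stack f = (pvRun cfp res stack f).1 := by
  induction f with
  | zero =>
    intro stack res
    cases stack with
    | nil => simp [pvLoop, pvRun]
    | cons p rest => rw [pvLoop, pvRun_zero]
  | succ f ih =>
    intro stack res
    cases stack with
    | nil => simp [pvLoop, pvRun]
    | cons p rest =>
      obtain ⟨n, anc⟩ := p
      rw [pvLoop, ih, pvRun, pvAdd, pvChildLoop_eq_pvRun, pvRun_append]

-- ===== VERDICT (by name: the statement is the Claim_ definition above) =====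
theorem calc_depth_first_pre_order_spec : Claim_equal_calc_depth_first_pre_order := by
  intro root_tag_ids children_for_parent _ _
  unfold Spec_calc_depth_first_pre_order
  unfold calc_depth_first_pre_order calc_depth_first_pre_order_alt
  rw [pvChildLoop_eq_pvRun, pvLoop_eq_pvRun]
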